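-- pv_equiv track=rewrite | github.com/MerinRose123/manglish_text_editor | manglish_text_editor/transliterator.py | reduceNoise
-- ===== SOURCE A (Python) =====
-- def getMaxTokenCount(tokenMatrix):
--     count = 1
--     for i in tokenMatrix:
--         count *= len(i)
--     return count
--
-- def getLargestMatrixIndex(matrix):
--     index = 0
--     for i in range(1, len(matrix)):
--         if len(matrix[i]) > len(matrix[index]):
--             index = i
--     return index
--
-- def reduceNoise(matrix):
--     for m in matrix:
--         for i in range(0, len(m)):
--             if '~' in m[i][0] and len(m[i]) > 0:
--                 m.remove(m[i])
--
--     while getMaxTokenCount(matrix) > 100: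
--         index = getLargestMatrixIndex(matrix)
--         if len(matrix[index]) > 1:
--             matrix[index] = matrix[index][:len(matrix[index]) - 1]
--
--     return matrix
-- ===== SOURCE B (Python) =====
-- def reduceNoise(matrix):
--     # Keep only tokens whose first string has no '~'; then shrink lengths
--     # (always the first longest row) until the product of lengths is <= 100,
--     # and cut each row to its final length in one slice at the end.
--     rows = [[t for t in m if '~' not in t[0]] for m in matrix]
--     lens = [len(r) for r in rows]
--     prod = 1
--     for x in lens:
--         prod *= x
--     while prod > 100:
--         j = 0
--         for i in range(1, len(lens)):
--             if lens[i] > lens[j]: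
--                 j = i
--         prod = (prod // lens[j]) * (lens[j] - 1)
--         lens[j] -= 1
--     return [r[:l] for r, l in zip(rows, lens)]
-- ===== Notes on version B (the rewrite author's own statement) =====
-- stated objective: faster
-- what changed: B replaces A's mutate-while-iterating noise removal by a single filter comprehension and runs the trimming while-loop purely on the integer length vector with an incrementally maintained product (A recomputes the product over all rows and copies a row by slicing on every iteration); each row is sliced once at the end.
import Mathlib
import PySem

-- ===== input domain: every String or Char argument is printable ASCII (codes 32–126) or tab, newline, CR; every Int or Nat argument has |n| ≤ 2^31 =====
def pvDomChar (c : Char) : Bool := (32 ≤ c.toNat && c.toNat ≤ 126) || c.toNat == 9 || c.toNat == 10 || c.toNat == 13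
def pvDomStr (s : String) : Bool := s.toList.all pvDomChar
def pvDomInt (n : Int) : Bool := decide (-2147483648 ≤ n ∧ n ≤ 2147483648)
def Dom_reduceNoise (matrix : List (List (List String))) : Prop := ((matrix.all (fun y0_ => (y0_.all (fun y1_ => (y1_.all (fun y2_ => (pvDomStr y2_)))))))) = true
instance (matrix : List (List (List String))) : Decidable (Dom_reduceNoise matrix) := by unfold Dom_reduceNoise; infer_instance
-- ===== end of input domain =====

-- B filters noise tokens with one comprehension and runs the trimming loop on the
-- integer length vector with an incrementally maintained product, slicing each row
-- once at the end (alternative decomposition; A additionally mutates its argument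
-- in place — the equivalence proved here is about the RETURN value only).

-- ===== PORT A =====
def getMaxTokenCount (tokenMatrix : List (List (List String))) : Int :=
  tokenMatrix.foldl (fun count i => count * PySem.List.len i) 1

def getLargestMatrixIndex (matrix : List (List (List String))) : Int :=
  (PySem.List.pyRange 1 (PySem.List.len matrix)).foldl
    (fun index i =>
      if PySem.List.len (PySem.List.pyGetD matrix i []) >
         PySem.List.len (PySem.List.pyGetD matrix index []) then i else index) 0

-- 'for i in range(0, len(m)): if '~' in m[i][0] and len(m[i]) > 0: m.remove(m[i])'
-- (an out-of-range m[i] or empty m[i] raises IndexError in Python: those inputs are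
--  outside Pre_; the port leaves the row unchanged there)
def removeScan (m : List (List String)) : List (List String) :=
  (PySem.List.pyRange 0 (PySem.List.len m)).foldl
    (fun cur i =>
      match PySem.List.pyGet? cur i with
      | none => cur
      | some x =>
        match PySem.List.pyGet? x 0 with
        | none => cur
        | some s =>
          if PySem.Str.isIn "~" s && decide (PySem.List.len x > 0) then
            (PySem.List.remove? cur x).getD cur
          else cur) m

-- 'while getMaxTokenCount(matrix) > 100: …'
def trimWhile (matrix : List (List (List String))) : List (List (List String)) :=
  if getMaxTokenCount matrix > 100 then
    let index := getLargestMatrixIndex matrix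
    let cur := PySem.List.pyGetD matrix index []
    if PySem.List.len cur > 1 then
      let matrix' := PySem.List.pySetD matrix index
          (PySem.List.slice cur none (some (PySem.List.len cur - 1)))
      if _h : (getMaxTokenCount matrix').toNat < (getMaxTokenCount matrix).toNat then
        trimWhile matrix'
      else matrix'  -- totality guard only; on genuine states the product strictly decreases
    else matrix     -- Python loops forever here; unreachable (product > 100 forces a row of length ≥ 2)
  else matrix
termination_by (getMaxTokenCount matrix).toNat
decreasing_by exact _h

def reduceNoise (matrix : List (List (List String))) : List (List (List String)) :=
  trimWhile (matrix.map (fun m => removeScan m))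

-- ===== PORT B =====
-- ''~' not in t[0]' ; an empty t raises IndexError in Python: outside Pre_
def keepToken (t : List String) : Bool :=
  !(PySem.Str.isIn "~" (PySem.List.pyGetD t 0 ""))

-- 'while prod > 100: j = first argmax of lens; prod = prod // lens[j] * (lens[j]-1); lens[j] -= 1'
def trimLens (prod : Int) (lens : List Int) : List Int :=
  if prod > 100 then
    let j := (PySem.List.pyRange 1 (PySem.List.len lens)).foldl
      (fun j i => if PySem.List.pyGetD lens i 0 > PySem.List.pyGetD lens j 0 then i else j) 0
    let L := PySem.List.pyGetD lens j 0
    let prod' := PySem.Int.floordiv prod L * (L - 1)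
    if _h : prod'.toNat < prod.toNat then
      trimLens prod' (PySem.List.pySetD lens j (L - 1))
    else lens  -- totality guard only; on genuine length vectors the product strictly decreases
  else lens
termination_by prod.toNat
decreasing_by exact _h

def reduceNoise_alt (matrix : List (List (List String))) : List (List (List String)) :=
  let rows := matrix.map (fun m => m.filter keepToken)
  let lens := rows.map (fun r => PySem.List.len r)
  let prod := lens.foldl (fun p x => p * x) 1
  let final := trimLens prod lens
  (rows.zip final).map (fun rl => PySem.List.slice rl.1 none (some rl.2))

-- ===== PRECONDITION & SPEC =====
-- Pre_ is exactly the domain on which the Python A returns: an empty token list, or a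
-- '~' in the first string of any non-final token of a row, makes A raise IndexError
-- (the removal shrinks the row under the running index).
def Pre_reduceNoise (matrix : List (List (List String))) : Prop :=
  (matrix.all (fun m =>
     m.all (fun t => !t.isEmpty) &&
     m.dropLast.all (fun t => !(PySem.Str.isIn "~" (t.headD ""))))) = true
instance (matrix : List (List (List String))) : Decidable (Pre_reduceNoise matrix) := by
  unfold Pre_reduceNoise; infer_instance

def pvWitness_reduceNoise : List (List (List String)) := [[["a"], ["~b"]], [["c", "d"]]]

def Spec_reduceNoise (matrix : List (List (List String))) (out : List (List (List String))) : Prop := out = reduceNoise_alt matrix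
instance (matrix : List (List (List String))) (out : List (List (List String))) : Decidable (Spec_reduceNoise matrix out) := by unfold Spec_reduceNoise; infer_instance

-- ===== CLAIM (what is proved, stated in full; the proofs are below) =====
def Claim_equal_reduceNoise : Prop := ∀ (matrix : List (List (List String))), Dom_reduceNoise matrix → Pre_reduceNoise matrix → Spec_reduceNoise matrix (reduceNoise matrix)

-- ===== LEMMAS AND PROOFS =====

theorem foldl_fix {α β : Type} (l : List α) (f : β → α → β) (b : β) (h : ∀ a ∈ l, f b a = b) : l.foldl f b = b := by
  induction l with
  | nil => rfl
  | cons x xs ih =>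
    simp only [List.mem_cons, List.foldl_cons] at h ⊢
    rw [h x (Or.inl rfl)]; exact ih (fun a ha => h a (Or.inr ha))

theorem remove_last {z : List String} (ys : List (List String)) (h : z ∉ ys) :
    PySem.List.remove? (ys ++ [z]) z = some ys := by
  induction ys with
  | nil => simp [PySem.List.remove?_cons_self]
  | cons y ys ih =>
    simp only [List.mem_cons, not_or] at h
    rw [List.cons_append, PySem.List.remove?_cons_of_ne _ (Ne.symm h.1), ih h.2]
    rfl

theorem removeScan_eq (m : List (List String))
    (h1 : ∀ t ∈ m, t ≠ [])
    (h2 : ∀ t ∈ m.dropLast, PySem.Str.isIn "~" (t.headD "") = false) :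
    removeScan m = m.filter keepToken := by
  rcases List.eq_nil_or_concat m with rfl | ⟨ys, z, rfl⟩
  · rfl
  · rw [List.concat_eq_append] at h1 h2 ⊢
    have hdrop : (ys ++ [z]).dropLast = ys := List.dropLast_concat
    rw [hdrop] at h2
    have hz : z ≠ [] := h1 z (by simp)
    obtain ⟨zh, zt, rfl⟩ := List.exists_cons_of_ne_nil hz
    -- every element of ys keeps
    have hkeep : ∀ t ∈ ys, keepToken t = true := by
      intro t ht
      obtain ⟨th, tt, rfl⟩ := List.exists_cons_of_ne_nil (h1 t (by simp [ht]))
      have := h2 _ ht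
      simp only [List.headD_cons] at this
      simp only [keepToken, PySem.List.pyGetD_zero_cons, this, Bool.not_false]
    have hfil : (ys ++ [zh :: zt]).filter keepToken =
        ys ++ (if keepToken (zh :: zt) then [zh :: zt] else []) := by
      rw [List.filter_append]
      congr 1
      · exact List.filter_eq_self.mpr hkeep
      · cases hk : keepToken (zh :: zt) <;> simp [hk]
    -- the fold
    unfold removeScan
    have hlen : PySem.List.len (ys ++ [zh :: zt]) = (ys.length : Int) + 1 := by
      simp [PySem.List.len_eq]
    rw [hlen, PySem.List.pyRange_one_succ_right (by positivity), List.foldl_append]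
    -- first part: state stays m
    rw [foldl_fix (l := PySem.List.pyRange 0 (ys.length : Int))]
    · -- last step
      simp only [List.foldl_cons, List.foldl_nil]
      rw [PySem.List.pyGet?_append_length]
      simp only [PySem.List.pyGet?_zero_cons]
      by_cases htil : PySem.Str.isIn "~" zh
      · have hnotin : (zh :: zt) ∉ ys := by
          intro hmem
          have := h2 _ hmem
          simp only [List.headD_cons] at this
          rw [htil] at this; exact Bool.true_eq_false.mp this
        have hcond : (PySem.Str.isIn "~" zh && decide (PySem.List.len (zh :: zt) > 0)) = true := by
          rw [htil]
          simp [PySem.List.len_eq]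
        rw [if_pos hcond, remove_last ys hnotin]
        have : keepToken (zh :: zt) = false := by
          simp only [keepToken, PySem.List.pyGetD_zero_cons, htil, Bool.not_true]
        rw [hfil, this]
        simp
      · simp only [Bool.not_eq_true] at htil
        rw [if_neg (by rw [htil]; simp)]
        have : keepToken (zh :: zt) = true := by
          simp only [keepToken, PySem.List.pyGetD_zero_cons, htil, Bool.not_false]
        rw [hfil, this]
        simp
    · -- elements of the range leave m unchanged
      intro i hi
      have hi' := (PySem.List.mem_pyRange_one).mp hi
      have h0 : 0 ≤ i := hi'.1
      have hlt : i.toNat < ys.length := by omega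
      have : PySem.List.pyGet? (ys ++ [zh :: zt]) i = some ys[i.toNat] := by
        rw [PySem.List.pyGet?_of_nonneg _ h0]
        rw [List.getElem?_append_left hlt]
        simp [List.getElem?_eq_getElem hlt]
      rw [this]
      have hmem : ys[i.toNat] ∈ ys := List.getElem_mem _
      obtain ⟨th, tt, het⟩ := List.exists_cons_of_ne_nil (h1 _ (by simp [List.mem_append]; exact Or.inl hmem))
      rw [het]
      simp only [PySem.List.pyGet?_zero_cons]
      have := h2 _ hmem
      rw [het] at this
      simp only [List.headD_cons] at this
      rw [this]
      simp

-- the argmax fold of B, over an arbitrary Int list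
theorem argmax_fold (lens : List Int) (k : Nat) (hk : 1 ≤ k) (hk2 : k ≤ lens.length) :
    ∃ jN : Nat,
      (PySem.List.pyRange 1 (k : Int)).foldl
        (fun j i => if PySem.List.pyGetD lens i 0 > PySem.List.pyGetD lens j 0 then i else j) 0
        = (jN : Int) ∧ jN < k ∧ ∀ i < k, lens.getD i 0 ≤ lens.getD jN 0 := by
  induction k with
  | zero => omega
  | succ k ih =>
    rcases Nat.eq_or_lt_of_le hk with h1 | h1
    · refine ⟨0, ?_, by omega, ?_⟩
      · have : ((k:Int) + 1) = (1:Int) := by omega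
        rw [show ((k:Nat) + 1 : Nat) = 1 from by omega]
        simp [PySem.List.pyRange]
      · intro i hi
        have : i = 0 := by omega
        subst this; exact le_refl _
    · obtain ⟨jN, hfold, hlt, hmax⟩ := ih (by omega) (by omega)
      have hsplit : PySem.List.pyRange 1 ((k:Nat)+1 : Nat) = PySem.List.pyRange 1 (k : Int) ++ [(k:Int)] := by
        push_cast
        exact PySem.List.pyRange_one_succ_right (by omega)
      rw [hsplit, List.foldl_append, hfold]
      simp only [List.foldl_cons, List.foldl_nil]
      by_cases hc : PySem.List.pyGetD lens (k:Int) 0 > PySem.List.pyGetD lens (jN:Int) 0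
      · refine ⟨k, by rw [if_pos hc], by omega, ?_⟩
        intro i hi
        have hgk : PySem.List.pyGetD lens (k:Int) 0 = lens.getD k 0 := by
          simp [PySem.List.pyGetD_natCast]
        have hgj : PySem.List.pyGetD lens (jN:Int) 0 = lens.getD jN 0 := by
          simp [PySem.List.pyGetD_natCast]
        rcases Nat.lt_succ_iff_lt_or_eq.mp hi with h | rfl
        · exact le_trans (hmax i h) (by rw [← hgk, ← hgj]; omega)
        · exact le_refl _
      · refine ⟨jN, by rw [if_neg hc], by omega, ?_⟩
        intro i hi
        have hgk : PySem.List.pyGetD lens (k:Int) 0 = lens.getD k 0 := by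
          simp [PySem.List.pyGetD_natCast]
        have hgj : PySem.List.pyGetD lens (jN:Int) 0 = lens.getD jN 0 := by
          simp [PySem.List.pyGetD_natCast]
        rcases Nat.lt_succ_iff_lt_or_eq.mp hi with h | rfl
        · exact hmax i h
        · rw [← hgk, ← hgj]; omega

-- A's argmax equals B's argmax on the length vector
theorem argmax_AB (rows : List (List (List String))) :
    getLargestMatrixIndex rows =
      (PySem.List.pyRange 1 (PySem.List.len (rows.map (fun r => PySem.List.len r)))).foldl
        (fun j i => if PySem.List.pyGetD (rows.map (fun r => PySem.List.len r)) i 0 >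
                       PySem.List.pyGetD (rows.map (fun r => PySem.List.len r)) j 0 then i else j) 0 := by
  unfold getLargestMatrixIndex
  have hlen : PySem.List.len (rows.map (fun r => PySem.List.len r)) = PySem.List.len rows := by
    simp [PySem.List.len_eq]
  rw [hlen]
  apply PySem.List.foldl_congr_mem
  intro acc x _
  have h1 : PySem.List.pyGetD (rows.map (fun r => PySem.List.len r)) x 0
      = PySem.List.len (PySem.List.pyGetD rows x []) := by
    have := PySem.List.pyGetD_map (fun r => PySem.List.len r) rows x []
    simpa using this
  have h2 : PySem.List.pyGetD (rows.map (fun r => PySem.List.len r)) acc 0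
      = PySem.List.len (PySem.List.pyGetD rows acc []) := by
    have := PySem.List.pyGetD_map (fun r => PySem.List.len r) rows acc []
    simpa using this
  rw [h1, h2]

-- product bridge
theorem count_eq_prod (rows : List (List (List String))) :
    getMaxTokenCount rows = ((rows.map (fun r => PySem.List.len r)).foldl (fun p x => p * x) 1) := by
  rw [List.foldl_map]; rfl

theorem count_eq_prod' (rows : List (List (List String))) :
    getMaxTokenCount rows = (rows.map (fun r => PySem.List.len r)).prod := by
  rw [count_eq_prod, List.prod_eq_foldl]

theorem trim_base (rows0 rows : List (List (List String)))
    (hc : ¬ getMaxTokenCount rows > 100)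
    (hlen : rows.length = rows0.length)
    (hpre : ∀ k, rows.getD k [] <+: rows0.getD k []) :
    trimWhile rows =
      (rows0.zip (trimLens (getMaxTokenCount rows) (rows.map (fun r => PySem.List.len r)))).map
        (fun rl => PySem.List.slice rl.1 none (some rl.2)) := by
  rw [trimWhile, if_neg hc, trimLens, if_neg hc]
  apply List.ext_getElem
  · simp [List.length_zip, hlen]
  · intro k hk1 hk2
    simp only [List.getElem_map, List.getElem_zip]
    have hk0 : k < rows0.length := by omega
    have hkr : k < rows.length := by omega
    rw [show PySem.List.len rows[k] = ((rows[k].length : Nat) : Int) from by simp [PySem.List.len_eq],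
      PySem.List.slice_to_natCast]
    have hp := hpre k
    rw [List.getD_eq_getElem rows [] hkr, List.getD_eq_getElem rows0 [] hk0] at hp
    exact List.prefix_iff_eq_take.mp hp

theorem trim_main (n : Nat) : ∀ (rows0 rows : List (List (List String))),
    (getMaxTokenCount rows).toNat ≤ n →
    rows.length = rows0.length →
    (∀ k, rows.getD k [] <+: rows0.getD k []) →
    trimWhile rows =
      (rows0.zip (trimLens (getMaxTokenCount rows) (rows.map (fun r => PySem.List.len r)))).map
        (fun rl => PySem.List.slice rl.1 none (some rl.2)) := by
  induction n with
  | zero =>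
    intro rows0 rows hn hlen hpre
    exact trim_base rows0 rows (by omega) hlen hpre
  | succ n ih =>
    intro rows0 rows hn hlen hpre
    by_cases hc : getMaxTokenCount rows > 100
    · set lens := rows.map (fun r => PySem.List.len r) with hlensdef
      have hlenlens : lens.length = rows.length := by simp [hlensdef]
      have hcprod : getMaxTokenCount rows = lens.prod := count_eq_prod' rows
      have hnonneg : ∀ x ∈ lens, 0 ≤ x := by
        intro x hx
        rw [hlensdef] at hx
        obtain ⟨r, _, rfl⟩ := List.mem_map.mp hx
        simp [PySem.List.len_eq]
      have hpos : ∀ x ∈ lens, 1 ≤ x := by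
        intro x hx
        rcases lt_or_ge x 1 with h | h
        · have hx0 : x = 0 := by have := hnonneg x hx; omega
          rw [hx0] at hx
          have := List.prod_eq_zero hx
          omega
        · exact h
      have hne : rows ≠ [] := by
        rintro rfl
        simp [getMaxTokenCount] at hc
      have hlen1 : 1 ≤ lens.length := by
        rw [hlenlens]
        exact List.length_pos_of_ne_nil hne
      obtain ⟨jN, hfold, hjlt, hmax⟩ := argmax_fold lens lens.length hlen1 (le_refl _)
      have hjr : jN < rows.length := by omega
      have hA : getLargestMatrixIndex rows = (jN : Int) := by
        rw [argmax_AB, ← hlensdef]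
        simp only [PySem.List.len_eq]
        exact hfold
      -- the maximal entry
      set a := lens.getD jN 0 with hadef
      have hajm : a = lens[jN]'(by omega) := List.getD_eq_getElem lens 0 (by omega)
      have ha2 : 2 ≤ a := by
        by_contra hlt
        rw [not_le] at hlt
        have hall1 : ∀ x ∈ lens, x = 1 := by
          intro x hx
          obtain ⟨i, hi, rfl⟩ := List.mem_iff_getElem.mp hx
          have h1 := hmax i hi
          rw [List.getD_eq_getElem lens 0 hi] at h1
          have h2 := hpos _ hx
          omega
        have := List.prod_eq_one hall1
        omega
      have haL : a = ((rows[jN]'hjr).length : Int) := by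
        rw [hadef, List.getD_eq_getElem lens 0 hjlt]
        simp [hlensdef, PySem.List.len_eq]
      set LN := (rows[jN]'hjr).length with hLNdef
      have hLN2 : 2 ≤ LN := by omega
      have hcur : PySem.List.pyGetD rows ((jN : Nat) : Int) [] = rows[jN]'hjr := by
        rw [PySem.List.pyGetD_natCast]
        exact List.getD_eq_getElem rows [] hjr
      have hlencur : PySem.List.len (rows[jN]'hjr) = (LN : Int) := by
        simp [PySem.List.len_eq, hLNdef]
      have hr' : PySem.List.slice (rows[jN]'hjr) none (some (PySem.List.len (rows[jN]'hjr) - 1))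
          = (rows[jN]'hjr).take (LN - 1) := by
        rw [hlencur, show (LN : Int) - 1 = ((LN - 1 : Nat) : Int) from by omega,
          PySem.List.slice_to_natCast]
      set r' := (rows[jN]'hjr).take (LN - 1) with hr'def
      set rowsN := rows.set jN r' with hrowsNdef
      set lensN := lens.set jN (a - 1) with hlensNdef
      have hlenr' : PySem.List.len r' = a - 1 := by
        rw [hr'def]
        simp [PySem.List.len_eq]
        omega
      have hmapN : rowsN.map (fun r => PySem.List.len r) = lensN := by
        rw [hrowsNdef, List.map_set, ← hlensdef, hlenr', hlensNdef]
      set Q := (lens.take jN).prod * (lens.drop (jN + 1)).prod with hQdef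
      have hdecomp : lens.prod = Q * a := by
        conv_lhs => rw [show lens = lens.set jN (lens[jN]'(by omega)) from
          (List.set_getElem_self (by omega)).symm]
        rw [List.prod_set, if_pos (by omega : jN < lens.length), ← hajm]
        ring
      have hQ1 : 1 ≤ Q := by
        have h1 : 1 ≤ (lens.take jN).prod :=
          List.one_le_prod (fun x hx => hpos x (List.take_subset _ _ hx))
        have h2 : 1 ≤ (lens.drop (jN + 1)).prod :=
          List.one_le_prod (fun x hx => hpos x (List.drop_subset _ _ hx))
        nlinarith
      have hcountN : getMaxTokenCount rowsN = Q * (a - 1) := by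
        rw [count_eq_prod' rowsN, hmapN, hlensNdef, List.prod_set,
          if_pos (by omega : jN < lens.length), hQdef]
        ring
      have hfd : PySem.Int.floordiv (getMaxTokenCount rows) a = Q := by
        rw [hcprod, hdecomp, PySem.Int.floordiv_eq_ediv_of_pos (by omega : (0:Int) < a)]
        exact Int.mul_ediv_cancel Q (by omega)
      have hdec : Q * (a - 1) < getMaxTokenCount rows := by
        rw [hcprod, hdecomp]
        nlinarith
      have hge0 : 0 ≤ Q * (a - 1) := by nlinarith
      have hguard : (getMaxTokenCount rowsN).toNat < (getMaxTokenCount rows).toNat := by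
        rw [hcountN]
        omega
      have hget : PySem.List.pyGetD lens ((jN : Nat) : Int) 0 = a := by
        rw [PySem.List.pyGetD_natCast]
      -- unfold the RHS loop one step
      have hRHS : trimLens (getMaxTokenCount rows) lens
          = trimLens (getMaxTokenCount rowsN) lensN := by
        rw [trimLens, if_pos hc]
        simp only [PySem.List.len_eq, hfold, hget, hfd, PySem.List.pySetD_natCast]
        rw [show Q * (a - 1) = getMaxTokenCount rowsN from hcountN.symm, ← hlensNdef]
        rw [dif_pos hguard]
      -- the invariant for the next state
      have hn' : (getMaxTokenCount rowsN).toNat ≤ n := Nat.le_of_lt_succ (Nat.lt_of_lt_of_le hguard hn)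
      have hlen' : rowsN.length = rows0.length := by
        rw [hrowsNdef]; simpa using hlen
      have hpre' : ∀ k, rowsN.getD k [] <+: rows0.getD k [] := by
        intro k
        by_cases hk : k < rows.length
        · rw [hrowsNdef, List.getD_eq_getElem _ [] (by simpa using hk)]
          by_cases hkj : jN = k
          · subst hkj
            rw [List.getElem_set_self (by simpa using hjr)]
            refine List.IsPrefix.trans (List.take_prefix _ _) ?_
            rw [← List.getD_eq_getElem rows [] hjr]
            exact hpre jN
          · rw [List.getElem_set_ne hkj, ← List.getD_eq_getElem rows [] hk]
            exact hpre k
        · rw [List.getD_eq_default _ _ (by simp [hrowsNdef]; omega)]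
          exact List.nil_prefix
      -- unfold the LHS loop one step
      have hgt1 : PySem.List.len (rows[jN]'hjr) > 1 := by rw [hlencur]; omega
      rw [trimWhile, if_pos hc]
      simp only [hA, hcur]
      rw [if_pos hgt1, hr']
      simp only [PySem.List.pySetD_natCast, ← hrowsNdef]
      rw [dif_pos hguard]
      rw [hRHS, ← hmapN]
      exact ih rows0 rowsN hn' hlen' hpre'
    · exact trim_base rows0 rows hc hlen hpre

theorem phase1_map (matrix : List (List (List String))) (hpre : Pre_reduceNoise matrix) :
    matrix.map (fun m => removeScan m) = matrix.map (fun m => m.filter keepToken) := by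
  apply List.map_congr_left
  intro m hm
  unfold Pre_reduceNoise at hpre
  rw [List.all_eq_true] at hpre
  obtain ⟨h1, h2⟩ := Bool.and_eq_true_iff.mp (hpre m hm)
  rw [List.all_eq_true] at h1 h2
  apply removeScan_eq
  · intro t ht
    have := h1 t ht
    simpa using this
  · intro t ht
    have := h2 t ht
    simpa using this

-- ===== VERDICT (by name: the statement is the Claim_ definition above) =====
theorem reduceNoise_spec : Claim_equal_reduceNoise := by
  intro matrix _hdom hpre
  unfold Spec_reduceNoise reduceNoise reduceNoise_alt
  rw [phase1_map matrix hpre]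
  rw [trim_main (getMaxTokenCount (matrix.map (fun m => m.filter keepToken))).toNat
    (matrix.map (fun m => m.filter keepToken)) (matrix.map (fun m => m.filter keepToken))
    (le_refl _) rfl (fun k => List.prefix_refl _)]
  simp only [count_eq_prod]
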